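-- pv_equiv track=rewrite | github.com/ecci87/Tag2 | tag2_sections.py | _all_headers_from_sections
-- ===== SOURCE A (Python) =====
-- def _is_general_section_name(name: str | None) -> bool:
--     normalized = str(name or "").strip()
--     if not normalized:
--         return True
--     normalized = normalized.lstrip("#").strip().lower()
--     return normalized == "general"
--
-- def _ordered_sections_for_output(sections: list[dict]) -> list[dict]:
--     """Keep section order stable while pinning the general section to the top."""
--     indexed_sections = list(enumerate(sections))
--     indexed_sections.sort(
--         key=lambda item: (0 if _is_general_section_name(item[1].get("name")) else 1, item[0])
--     )
--     return [section for _, section in indexed_sections]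
--
-- def _all_headers_from_sections(sections: list[dict]) -> list[str]:
--     """Collect structured section header lines used in caption files."""
--     headers: list[str] = []
--     seen: set[str] = set()
--     for section in _ordered_sections_for_output(sections):
--         section_name = str(section.get("name") or "").strip()
--         aliases = [section_name] if section_name else []
--         if _is_general_section_name(section_name):
--             aliases.extend(["(General)", "## General"])
--         for alias in aliases:
--             if not alias or alias in seen:
--                 continue
--             seen.add(alias)
--             headers.append(alias)
--     return headers
-- ===== SOURCE B (Python) =====
-- def _is_general_section_name(name):
--     normalized = str(name or "").strip()
--     if not normalized:
--         return True
--     return normalized.lstrip("#").strip().lower() == "general"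
--
--
-- def _all_headers_from_sections(sections):
--     # One pass: split into general / non-general buckets (stable), no sort.
--     general, others = [], []
--     for section in sections:
--         if _is_general_section_name(section.get("name")):
--             general.append(section)
--         else:
--             others.append(section)
--     headers = []
--     seen = set()
--     for section in general + others:
--         name = str(section.get("name") or "").strip()
--         if name and name not in seen:
--             seen.add(name)
--             headers.append(name)
--         if _is_general_section_name(name):
--             for alias in ("(General)", "## General"):
--                 if alias not in seen:
--                     seen.add(alias)
--                     headers.append(alias)
--     return headers
-- ===== Notes on version B (the rewrite author's own statement) =====
-- stated objective: alternative
-- what changed: Replaces the enumerate+sort-by-(general?,index) ordering with a single stable two-bucket partition (general sections, then the rest) and folds the dedup/alias emission directly over that order.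
import Mathlib
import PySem

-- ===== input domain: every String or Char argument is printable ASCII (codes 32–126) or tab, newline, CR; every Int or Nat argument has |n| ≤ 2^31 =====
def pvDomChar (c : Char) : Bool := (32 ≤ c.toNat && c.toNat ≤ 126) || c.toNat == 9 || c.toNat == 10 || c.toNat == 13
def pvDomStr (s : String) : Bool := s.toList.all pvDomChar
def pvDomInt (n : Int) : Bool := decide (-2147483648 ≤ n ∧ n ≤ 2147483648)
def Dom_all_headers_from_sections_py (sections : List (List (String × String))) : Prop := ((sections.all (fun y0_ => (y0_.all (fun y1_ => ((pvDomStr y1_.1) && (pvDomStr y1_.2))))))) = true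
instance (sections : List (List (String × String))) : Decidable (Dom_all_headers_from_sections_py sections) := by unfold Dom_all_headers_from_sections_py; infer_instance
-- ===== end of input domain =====

-- B replaces A's enumerate + sort by (general?, index) with a single stable two-bucket
-- partition followed by the same dedup fold (objective: alternative algorithm, no sort).

-- ===== PORT A =====
-- shared helper: Python's _is_general_section_name (used verbatim by both Source A and Source B).
-- '.lstrip("#")' is ported by hand as dropWhile (· == '#'), exact for a one-char strip set.
def pvIsGeneral (name : Option String) : Bool :=
  let normalized := PySem.Chars.strip ((name.getD "").toList)
  if normalized = [] then true
  else decide (PySem.Chars.lower (PySem.Chars.strip (normalized.dropWhile (fun c => c == '#'))) = "general".toList)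

-- section.get("name") on the association-list dict: first matching key (none = absent)
def pvGetName (sec : List (String × String)) : Option String :=
  (sec.find? (fun kv => kv.1 == "name")).map (fun kv => kv.2)

-- shared helper: str(section.get("name") or "").strip()
def pvSecName (sec : List (String × String)) : String :=
  String.ofList (PySem.Chars.strip (((pvGetName sec).getD "").toList))

-- body of A's inner 'for al in ales' loop
def pvInnerA (st : List String × PySem.Set String) (al : String) : List String × PySem.Set String :=
  if al = "" ∨ PySem.Set.contains st.2 al then st
  else (st.1 ++ [al], PySem.Set.add st.2 al)

-- body of A's outer 'for section in _ordered_sections_for_output(sections)' loop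
def pvStepA (st : List String × PySem.Set String) (sec : List (String × String)) :
    List String × PySem.Set String :=
  let sectionName := pvSecName sec
  let ales : List String := if sectionName = "" then [] else [sectionName]
  let ales := if pvIsGeneral (some sectionName) then ales ++ ["(General)", "## General"] else ales
  ales.foldl pvInnerA st

def all_headers_from_sections_py (sections : List (List (String × String))) : List String :=
  -- _ordered_sections_for_output: sort enumerate(sections) by the tuple key (general? 0 : 1, index)
  let ordered := (PySem.List.sorted2 (PySem.List.enumerate sections)
      (fun item => if pvIsGeneral (pvGetName item.2) then (0 : Int) else 1)
      (fun item => item.1)).map (fun item => item.2)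
  (ordered.foldl pvStepA ([], PySem.Set.empty)).1

-- ===== PORT B =====
-- body of B's bucket loop
def pvPartStep (acc : List (List (String × String)) × List (List (String × String)))
    (sec : List (String × String)) :
    List (List (String × String)) × List (List (String × String)) :=
  if pvIsGeneral (pvGetName sec) then (acc.1 ++ [sec], acc.2) else (acc.1, acc.2 ++ [sec])

-- body of B's main loop
def pvStepB (st : List String × PySem.Set String) (sec : List (String × String)) :
    List String × PySem.Set String :=
  let name := pvSecName sec
  let st1 := if name ≠ "" ∧ ¬ PySem.Set.contains st.2 name
    then (st.1 ++ [name], PySem.Set.add st.2 name) else st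
  if pvIsGeneral (some name) then
    ["(General)", "## General"].foldl
      (fun st al => if PySem.Set.contains st.2 al then st
        else (st.1 ++ [al], PySem.Set.add st.2 al)) st1
  else st1

def all_headers_from_sections_py_alt (sections : List (List (String × String))) : List String :=
  let buckets := sections.foldl pvPartStep ([], [])
  ((buckets.1 ++ buckets.2).foldl pvStepB ([], PySem.Set.empty)).1

-- ===== PRECONDITION & SPEC =====
def Spec_all_headers_from_sections_py (sections : List (List (String × String))) (out : List String) : Prop := out = all_headers_from_sections_py_alt sections
instance (sections : List (List (String × String))) (out : List String) : Decidable (Spec_all_headers_from_sections_py sections out) := by unfold Spec_all_headers_from_sections_py; infer_instance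

-- ===== CLAIM (what is proved, stated in full; the proofs are below) =====
def Claim_equal_all_headers_from_sections_py : Prop := ∀ (sections : List (List (String × String))), Dom_all_headers_from_sections_py sections → Spec_all_headers_from_sections_py sections (all_headers_from_sections_py sections)

-- ===== LEMMAS AND PROOFS =====

-- the partition predicate
def pvPred (sec : List (String × String)) : Bool := pvIsGeneral (pvGetName sec)

lemma pvPart_spec (l : List (List (String × String))) (a b : List (List (String × String))) :
    l.foldl pvPartStep (a, b) = (a ++ l.filter pvPred, b ++ l.filter (fun s => !pvPred s)) := by
  induction l generalizing a b with
  | nil => simp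
  | cons x xs ih =>
    rw [List.foldl_cons]
    by_cases h : pvPred x = true
    · have hx : pvPartStep (a, b) x = (a ++ [x], b) := by
        simp only [pvPartStep, pvPred] at h ⊢; rw [if_pos h]
      rw [hx, ih]
      simp [List.filter_cons, h]
    · simp only [Bool.not_eq_true] at h
      have hx : pvPartStep (a, b) x = (a, b ++ [x]) := by
        simp only [pvPartStep, pvPred] at h ⊢; rw [if_neg (by simp [h])]
      rw [hx, ih]
      simp [List.filter_cons, h]

-- the sort key of A as a single lex key
def pvKey (item : Int × List (String × String)) : Int ×ₗ Int :=
  toLex ((if pvPred item.2 then (0 : Int) else 1), item.1)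

lemma pvLexBool (A B x y : Int) :
    (decide (A < B) || (!decide (B < A) && decide (x < y))) = decide (toLex (A, x) < toLex (B, y)) := by
  rcases lt_trichotomy A B with h | h | h
  · simp [Prod.Lex.toLex_lt_toLex, h, not_lt_of_gt h]
  · subst h
    simp [Prod.Lex.toLex_lt_toLex]
  · simp [Prod.Lex.toLex_lt_toLex, h, not_lt_of_gt h, h.ne']

lemma pvBefore_eq :
    (fun (a b : Int × List (String × String)) =>
      decide ((fun item => if pvIsGeneral (pvGetName item.2) then (0 : Int) else 1) a
                < (fun item => if pvIsGeneral (pvGetName item.2) then (0 : Int) else 1) b) ||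
      (!decide ((fun item => if pvIsGeneral (pvGetName item.2) then (0 : Int) else 1) b
                < (fun item => if pvIsGeneral (pvGetName item.2) then (0 : Int) else 1) a) &&
       decide ((fun item : Int × List (String × String) => item.1) a
                < (fun item : Int × List (String × String) => item.1) b)))
    = fun a b => decide (pvKey a < pvKey b) := by
  funext a b
  exact pvLexBool _ _ _ _

lemma pvSorted2_eq_sorted (xs : List (Int × List (String × String))) :
    PySem.List.sorted2 xs
      (fun item => if pvIsGeneral (pvGetName item.2) then (0 : Int) else 1)
      (fun item => item.1) false
    = PySem.List.sorted xs pvKey false :=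
  congrArg (fun f => List.foldl (fun acc x => PySem.List.insertBy f x acc) ([] : List _) xs)
    pvBefore_eq

lemma pvSorted_eq_partition (sections : List (List (String × String))) :
    PySem.List.sorted (PySem.List.enumerate sections) pvKey false
    = (PySem.List.enumerate sections).filter (fun it => pvPred it.2)
      ++ (PySem.List.enumerate sections).filter (fun it => !pvPred it.2) := by
  apply PySem.List.sorted_eq_of_perm_of_pairwise_lt
  · exact List.filter_append_perm _ _
  · rw [List.pairwise_append]
    have hp := PySem.List.pairwise_lt_enumerate sections 0
    refine ⟨?_, ?_, ?_⟩
    · refine (hp.filter _).imp_of_mem ?_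
      intro a b ha hb hlt
      have ha' := (List.mem_filter.mp ha).2
      have hb' := (List.mem_filter.mp hb).2
      simp only [decide_eq_true_eq] at ha' hb'
      simp [pvKey, Prod.Lex.toLex_lt_toLex, ha', hb', hlt]
    · refine (hp.filter _).imp_of_mem ?_
      intro a b ha hb hlt
      have ha' := (List.mem_filter.mp ha).2
      have hb' := (List.mem_filter.mp hb).2
      simp only [Bool.not_eq_true'] at ha' hb'
      simp [pvKey, Prod.Lex.toLex_lt_toLex, ha', hb', hlt]
    · intro a ha b hb
      have ha' := (List.mem_filter.mp ha).2
      have hb' := (List.mem_filter.mp hb).2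
      simp only [Bool.not_eq_true'] at hb'
      simp only [decide_eq_true_eq] at ha'
      simp [pvKey, Prod.Lex.toLex_lt_toLex, ha', hb']

lemma pvMapSnd_filter (q : List (String × String) → Bool)
    (l : List (List (String × String))) (s : Int) :
    ((PySem.List.enumerate l s).filter (fun it => q it.2)).map (fun it => it.2)
    = l.filter q := by
  induction l generalizing s with
  | nil => simp [PySem.List.enumerate]
  | cons x xs ih =>
    rw [PySem.List.enumerate_cons]
    by_cases h : q x = true
    · simp [List.filter, h, ih]
    · simp only [Bool.not_eq_true] at h
      simp [List.filter, h, ih]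

lemma pvMapSnd_filter_not (l : List (List (String × String))) (s : Int) :
    ((PySem.List.enumerate l s).filter (fun it => !pvPred it.2)).map (fun it => it.2)
    = l.filter (fun s => !pvPred s) :=
  pvMapSnd_filter (fun s => !pvPred s) l s

lemma pvStep_eq (st : List String × PySem.Set String) (sec : List (String × String)) :
    pvStepA st sec = pvStepB st sec := by
  unfold pvStepA pvStepB
  by_cases hn : pvSecName sec = ""
  · have hg : pvIsGeneral (some "") = true := rfl
    rw [hn]
    simp [hg, pvInnerA, List.foldl]
  · by_cases hg : pvIsGeneral (some (pvSecName sec)) = true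
    · simp [hn, hg, pvInnerA, List.foldl]
    · simp only [Bool.not_eq_true] at hg
      simp [hn, hg, pvInnerA, List.foldl]

lemma pvFoldAB (l : List (List (String × String))) (st : List String × PySem.Set String) :
    l.foldl pvStepA st = l.foldl pvStepB st := by
  induction l generalizing st with
  | nil => rw [List.foldl_nil, List.foldl_nil]
  | cons x xs ih => rw [List.foldl_cons, List.foldl_cons, pvStep_eq, ih]


-- ===== VERDICT (by name: the statement is the Claim_ definition above) =====
theorem all_headers_from_sections_py_spec : Claim_equal_all_headers_from_sections_py := by
  intro sections _
  unfold Spec_all_headers_from_sections_py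
  simp only [all_headers_from_sections_py, all_headers_from_sections_py_alt]
  rw [pvSorted2_eq_sorted, pvSorted_eq_partition, pvPart_spec]
  simp only [List.nil_append, List.map_append]
  rw [pvMapSnd_filter pvPred, pvMapSnd_filter_not]
  rw [pvFoldAB]
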